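-- pv_equiv track=rewrite | github.com/Cleveerty/WynnAppTest | DocuScope/core/filters.py | apply_element_filter
-- ===== SOURCE A (Python) =====
-- from typing import List, Dict, Any, Optional, Callable
--
-- def apply_element_filter(items: List[Dict[str, Any]], elements: List[str]) -> List[Dict[str, Any]]:
--     """Filter items based on elemental preferences."""
--     if not elements:
--         return items
--
--     scored_items = []
--
--     # Map element names to stat keys
--     element_map = {
--         'earth': ['eDamPct', 'eDefPct'],
--         'thunder': ['tDamPct', 'tDefPct'],
--         'water': ['wDamPct', 'wDefPct'],
--         'fire': ['fDamPct', 'fDefPct'],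
--         'air': ['aDamPct', 'aDefPct']
--     }
--
--     preferred_stats = []
--     for element in elements:
--         element = element.lower()
--         if element in element_map:
--             preferred_stats.extend(element_map[element])
--
--     for item in items:
--         score = 0
--
--         # Score based on preferred elemental stats
--         for stat in preferred_stats:
--             if item.get(stat, 0) > 0:
--                 score += 2
--
--         # Neutral items (no elemental focus) get base score
--         if score == 0:
--             score = 1
--
--         scored_items.append((item, score))
--
--     scored_items.sort(key=lambda x: x[1], reverse=True)
--     return [item for item, score in scored_items if score > 0]
-- ===== SOURCE B (Python) =====
-- from typing import List, Dict, Any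
--
-- def apply_element_filter(items: List[Dict[str, Any]], elements: List[str]) -> List[Dict[str, Any]]:
--     """Filter items based on elemental preferences: sort the distinct scores once and
--     gather items bucket by bucket instead of sorting the whole item list."""
--     if not elements:
--         return items
--
--     element_map = {
--         'earth': ['eDamPct', 'eDefPct'],
--         'thunder': ['tDamPct', 'tDefPct'],
--         'water': ['wDamPct', 'wDefPct'],
--         'fire': ['fDamPct', 'fDefPct'],
--         'air': ['aDamPct', 'aDefPct']
--     }
--
--     preferred = [stat for e in elements for stat in element_map.get(e.lower(), [])]
--
--     def score(item):
--         s = 2 * sum(1 for stat in preferred if item.get(stat, 0) > 0)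
--         return s if s else 1
--
--     scores = [score(item) for item in items]
--
--     out = []
--     for s in sorted(set(scores), reverse=True):
--         out.extend(item for item, sc in zip(items, scores) if sc == s)
--     return out
-- ===== Notes on version B (the rewrite author's own statement) =====
-- stated objective: alternative
-- what changed: B replaces A's full stable sort of all (item, score) pairs by sorting only the distinct scores and concatenating, per distinct score in descending order, the items that attain it (scores computed once via a count, the trailing score>0 filter dropped since every score is at least 1).
import Mathlib
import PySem

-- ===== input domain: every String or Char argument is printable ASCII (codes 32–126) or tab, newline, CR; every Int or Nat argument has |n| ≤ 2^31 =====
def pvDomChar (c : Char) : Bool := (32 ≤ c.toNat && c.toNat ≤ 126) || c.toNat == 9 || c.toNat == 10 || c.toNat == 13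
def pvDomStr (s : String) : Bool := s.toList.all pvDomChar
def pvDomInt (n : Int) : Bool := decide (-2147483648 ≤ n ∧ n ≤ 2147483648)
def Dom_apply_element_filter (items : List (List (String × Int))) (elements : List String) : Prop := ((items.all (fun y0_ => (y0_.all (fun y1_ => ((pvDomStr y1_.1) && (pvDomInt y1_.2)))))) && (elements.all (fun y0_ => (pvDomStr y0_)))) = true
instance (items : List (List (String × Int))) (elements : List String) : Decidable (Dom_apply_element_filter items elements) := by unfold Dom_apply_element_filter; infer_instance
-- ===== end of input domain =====

-- B sorts the distinct scores instead of the whole scored item list and gathers the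
-- items of each score bucket in order; same result, a genuinely different traversal.

-- shared literal constant: the element_map dict of the Python source
def pvElementMap : PySem.Dict String (List String) :=
  PySem.Dict.mk
  [("earth", ["eDamPct", "eDefPct"]),
   ("thunder", ["tDamPct", "tDefPct"]),
   ("water", ["wDamPct", "wDefPct"]),
   ("fire", ["fDamPct", "fDefPct"]),
   ("air", ["aDamPct", "aDefPct"])]

-- ===== PORT A =====
def apply_element_filter (items : List (List (String × Int))) (elements : List String) : List (List (String × Int)) :=
  if elements = [] then items
  else
    let preferred_stats : List String :=
      elements.foldl (fun acc element =>
        let element := PySem.Str.lower element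
        if PySem.Dict.contains pvElementMap element then
          acc ++ (PySem.Dict.get? pvElementMap element).getD []
        else acc) []
    let scored_items : List (List (String × Int) × Int) :=
      items.foldl (fun acc item =>
        let score : Int :=
          preferred_stats.foldl (fun score stat =>
            if PySem.Dict.getD (PySem.Dict.mk item) stat 0 > 0 then score + 2 else score) 0
        let score : Int := if score = 0 then 1 else score
        acc ++ [(item, score)]) []
    let sorted_items := PySem.List.sorted scored_items (fun x => x.2) true
    (sorted_items.filter (fun x => decide (x.2 > 0))).map (fun x => x.1)

-- ===== PORT B =====
def pvScoreB (preferred : List String) (item : List (String × Int)) : Int :=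
  let s : Int := 2 * ((preferred.countP (fun stat => PySem.Dict.getD (PySem.Dict.mk item) stat 0 > 0) : Nat) : Int)
  if s ≠ 0 then s else 1

def apply_element_filter_alt (items : List (List (String × Int))) (elements : List String) : List (List (String × Int)) :=
  if elements = [] then items
  else
    let preferred : List String :=
      elements.flatMap (fun e => PySem.Dict.getD pvElementMap (PySem.Str.lower e) [])
    let scores : List Int := items.map (pvScoreB preferred)
    (PySem.List.sorted (PySem.Set.ofList scores) (fun s => s) true).foldl
      (fun acc s => acc ++ ((items.zip scores).filter (fun p => decide (p.2 = s))).map (fun p => p.1)) []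

-- ===== PRECONDITION & SPEC =====
def Spec_apply_element_filter (items : List (List (String × Int))) (elements : List String) (out : List (List (String × Int))) : Prop := out = apply_element_filter_alt items elements
instance (items : List (List (String × Int))) (elements : List String) (out : List (List (String × Int))) : Decidable (Spec_apply_element_filter items elements out) := by unfold Spec_apply_element_filter; infer_instance

-- ===== CLAIM (what is proved, stated in full; the proofs are below) =====
def Claim_equal_apply_element_filter : Prop := ∀ (items : List (List (String × Int))) (elements : List String), Dom_apply_element_filter items elements → Spec_apply_element_filter items elements (apply_element_filter items elements)

-- ===== LEMMAS AND PROOFS =====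

-- 'score += 2 per passing stat' is twice the count of passing stats
lemma pv_foldl_ite_add_two {α : Type} (p : α → Prop) [DecidablePred p] (l : List α) (a : Int) :
    l.foldl (fun acc x => if p x then acc + 2 else acc) a
      = a + 2 * ((l.countP (fun x => decide (p x)) : Nat) : Int) := by
  induction l generalizing a with
  | nil => simp
  | cons x t ih =>
      by_cases h : p x
      · simp [h, ih]; ring
      · simp [h, ih]

lemma pv_if_flip (c : Int) : (if 2 * c = 0 then (1:Int) else 2 * c) = (if 2 * c ≠ 0 then 2 * c else 1) := by
  by_cases h : 2 * c = 0 <;> simp [h]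

-- insertBy walks past a prefix none of whose elements come after x
lemma pv_insertBy_append_left {α : Type} (before : α → α → Bool) (x : α) (as bs : List α)
    (h : ∀ y ∈ as, before x y = false) :
    PySem.List.insertBy before x (as ++ bs) = as ++ PySem.List.insertBy before x bs := by
  induction as with
  | nil => simp
  | cons a t ih =>
      have ha : before x a = false := h a (by simp)
      simp [PySem.List.insertBy, ha]
      exact ih (fun y hy => h y (by simp [hy]))

-- insertBy puts x in front when every element comes after x
lemma pv_insertBy_all_before {α : Type} (before : α → α → Bool) (x : α) (bs : List α)
    (h : ∀ y ∈ bs, before x y = true) :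
    PySem.List.insertBy before x bs = x :: bs := by
  cases bs with
  | nil => rfl
  | cons b t => simp [PySem.List.insertBy, h b (by simp)]

-- inserting x into the descending bucket concatenation of ys yields that of ys ++ [x]
lemma pv_insert_gather {α : Type} (k : α → Int) (x : α) (ys : List α) :
    ∀ (S : List Int), S.Pairwise (fun a b => b < a) → k x ∈ S →
    PySem.List.insertBy (fun a b => decide (k b < k a)) x
        (S.flatMap (fun s => ys.filter (fun y => decide (k y = s))))
      = S.flatMap (fun s => (ys ++ [x]).filter (fun y => decide (k y = s))) := by
  intro S
  induction S with
  | nil => intro _ hx; simp at hx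
  | cons s S' ih =>
      intro hpair hx
      have hlt : ∀ s' ∈ S', s' < s := (List.pairwise_cons.mp hpair).1
      have hpair' := (List.pairwise_cons.mp hpair).2
      have hfront : ∀ y ∈ ys.filter (fun y => decide (k y = s)), (fun a b => decide (k b < k a)) x y = false := by
        intro y hy
        have hk : k y = s := by
          have := List.of_mem_filter hy; simpa using this
        by_cases hxs : k x = s
        · simp [hk, hxs]
        · have hxS' : k x ∈ S' := by
            rcases List.mem_cons.mp hx with h | h
            · exact absurd h hxs
            · exact h
          have : k x < s := hlt _ hxS'
          simp [hk]; omega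
      simp only [List.flatMap_cons]
      rw [pv_insertBy_append_left _ _ _ _ hfront]
      by_cases hxs : k x = s
      · -- x lands at the very front of the remaining (strictly smaller) buckets
        have hall : ∀ y ∈ S'.flatMap (fun s => ys.filter (fun y => decide (k y = s))),
            (fun a b => decide (k b < k a)) x y = true := by
          intro y hy
          rcases List.mem_flatMap.mp hy with ⟨s', hs', hyf⟩
          have hk : k y = s' := by
            have := List.of_mem_filter hyf; simpa using this
          have : s' < s := hlt _ hs'
          simp [hk, hxs]; omega
        rw [pv_insertBy_all_before _ _ _ hall]
        have hS'eq : S'.flatMap (fun s => (ys ++ [x]).filter (fun y => decide (k y = s)))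
            = S'.flatMap (fun s => ys.filter (fun y => decide (k y = s))) := by
          apply List.flatMap_congr
          intro s' hs'
          have hne : k x ≠ s' := by
            have := hlt _ hs'; omega
          simp [List.filter_append, hne]
        rw [hS'eq]
        simp [List.filter_append, hxs]
      · have hxS' : k x ∈ S' := by
          rcases List.mem_cons.mp hx with h | h
          · exact absurd h hxs
          · exact h
        rw [ih hpair' hxS']
        simp [List.filter_append, hxs]

-- a stable descending sort is the concatenation of the key buckets,
-- taken along any strictly decreasing list of keys covering all elements
lemma pv_sorted_rev_eq_gather {α : Type} (k : α → Int) (xs : List α) (S : List Int)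
    (hdec : S.Pairwise (fun a b => b < a)) (hmem : ∀ x ∈ xs, k x ∈ S) :
    PySem.List.sorted xs k true = S.flatMap (fun s => xs.filter (fun y => decide (k y = s))) := by
  induction xs using List.reverseRecOn with
  | nil => simp [PySem.List.sorted]
  | append_singleton ys x ih =>
      have ih' := ih (fun y hy => hmem y (by simp [hy]))
      rw [PySem.List.sorted_rev_eq_foldl_insertBy] at ih' ⊢
      rw [List.foldl_append]
      simp only [List.foldl_cons, List.foldl_nil]
      rw [ih']
      exact pv_insert_gather k x ys S hdec (hmem x (by simp))

-- ===== VERDICT (by name: the statement is the Claim_ definition above) =====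
theorem apply_element_filter_spec : Claim_equal_apply_element_filter := by
  intro items elements _
  unfold Spec_apply_element_filter apply_element_filter apply_element_filter_alt
  by_cases h : elements = []
  · simp [h]
  · simp only [if_neg h]
    -- step 1: the two 'preferred stats' computations agree
    have hbody : ∀ (acc : List String) (e : String),
        (let el := PySem.Str.lower e;
         if PySem.Dict.contains pvElementMap el then acc ++ (PySem.Dict.get? pvElementMap el).getD [] else acc)
        = acc ++ PySem.Dict.getD pvElementMap (PySem.Str.lower e) [] := by
      intro acc e
      by_cases hc : PySem.Dict.contains pvElementMap (PySem.Str.lower e) = true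
      · simp [hc, PySem.Dict.getD]
      · have hn : PySem.Dict.get? pvElementMap (PySem.Str.lower e) = none := by
          simp only [PySem.Dict.contains, List.any_eq_true, not_exists, not_and] at hc
          simp only [PySem.Dict.get?, Option.map_eq_none_iff, List.find?_eq_none]
          intro p hp; exact hc p hp
        simp [hc, PySem.Dict.getD, hn]
    have hpref : elements.foldl (fun acc element =>
          let element := PySem.Str.lower element
          if PySem.Dict.contains pvElementMap element then
            acc ++ (PySem.Dict.get? pvElementMap element).getD []
          else acc) []
        = elements.flatMap (fun e => PySem.Dict.getD pvElementMap (PySem.Str.lower e) []) := by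
      rw [PySem.List.foldl_congr_mem elements _
          (fun acc e => acc ++ PySem.Dict.getD pvElementMap (PySem.Str.lower e) []) []
          (fun acc x _ => hbody acc x)]
      simpa using PySem.List.foldl_append_eq_flatMap
        (fun e => PySem.Dict.getD pvElementMap (PySem.Str.lower e) []) elements []
    rw [hpref]
    set P := elements.flatMap (fun e => PySem.Dict.getD pvElementMap (PySem.Str.lower e) []) with hP
    -- step 2: A's per-item score is pvScoreB
    have hscore : ∀ item : List (String × Int),
        (let score : Int := P.foldl (fun score stat =>
            if PySem.Dict.getD (PySem.Dict.mk item) stat 0 > 0 then score + 2 else score) 0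
         let score : Int := if score = 0 then 1 else score
         score) = pvScoreB P item := by
      intro item
      show (if (P.foldl (fun score stat =>
            if PySem.Dict.getD (PySem.Dict.mk item) stat 0 > 0 then score + 2 else score) 0) = 0 then (1:Int) else _) = _
      rw [pv_foldl_ite_add_two]
      simp only [zero_add]
      rw [pv_if_flip]
      simp only [pvScoreB]
    -- step 3: A's scored_items list is a map
    have hscored : items.foldl (fun acc item =>
          let score : Int := P.foldl (fun score stat =>
              if PySem.Dict.getD (PySem.Dict.mk item) stat 0 > 0 then score + 2 else score) 0
          let score : Int := if score = 0 then 1 else score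
          acc ++ [(item, score)]) []
        = items.map (fun item => (item, pvScoreB P item)) := by
      rw [PySem.List.foldl_congr_mem items _
          (fun acc item => acc ++ [(item, pvScoreB P item)]) []
          (fun acc x _ => by simp only [← hscore x])]
      simpa using PySem.List.foldl_append_singleton_eq_map
        (fun item => (item, pvScoreB P item)) items []
    rw [hscored]
    -- step 4: B's zip is the same map
    have hzip : items.zip (items.map (pvScoreB P)) = items.map (fun it => (it, pvScoreB P it)) := by
      have := @List.zip_map' _ _ _ id (pvScoreB P) items
      simpa using this
    rw [hzip]
    set M := items.map (fun it => (it, pvScoreB P it)) with hM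
    set S := PySem.List.sorted (PySem.Set.ofList (items.map (pvScoreB P))) (fun s => s) true with hS
    -- step 5: S is strictly decreasing and covers all scores of M
    have hdec : S.Pairwise (fun a b => b < a) := by
      have h1 := PySem.List.sorted_pairwise_rev (PySem.Set.ofList (items.map (pvScoreB P))) (fun s => s)
      have h2 : S.Nodup := by
        rw [hS]
        exact (PySem.List.sorted_perm (PySem.Set.ofList (items.map (pvScoreB P))) (fun s => s) true).symm.nodup
          (PySem.Set.nodup_ofList _)
      exact (h1.and h2).imp (fun hab => lt_of_le_of_ne hab.1 (fun e => hab.2 e.symm))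
    have hmem : ∀ x ∈ M, x.2 ∈ S := by
      intro x hx
      rcases List.mem_map.mp hx with ⟨it, hit, rfl⟩
      rw [hS, PySem.List.mem_sorted, PySem.Set.mem_ofList]
      exact List.mem_map.mpr ⟨it, hit, rfl⟩
    -- step 6: A's trailing 'score > 0' filter keeps everything
    have hposB : ∀ it : List (String × Int), 0 < pvScoreB P it := by
      intro it
      simp only [pvScoreB]
      split_ifs with hz <;> omega
    have hfilter : (PySem.List.sorted M (fun x => x.2) true).filter (fun x => decide (x.2 > 0))
        = PySem.List.sorted M (fun x => x.2) true := by
      apply List.filter_eq_self.mpr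
      intro x hx
      rcases List.mem_map.mp ((PySem.List.mem_sorted _ _ _ _).mp hx) with ⟨it, _, rfl⟩
      simpa using hposB it
    rw [hfilter]
    -- step 7: the stable descending sort is the bucket gather
    rw [pv_sorted_rev_eq_gather (fun x => x.2) M S hdec hmem]
    rw [PySem.List.foldl_append_eq_flatMap]
    simp [List.map_flatMap]
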